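-- pv_equiv track=rewrite | github.com/chanchantang/eng-intern-challenge | python/translator.py | convert_english_to_braille
-- ===== SOURCE A (Python) =====
-- english_to_braille = {
--     'a': "O.....",
--     'b': "O.O...",
--     'c': "OO....",
--     'd': "OO.O..",
--     'e': "O..O..",
--     'f': "OOO...",
--     'g': "OOOO..",
--     'h': "O.OO..",
--     'i': ".OO...",
--     'j': ".OOO..",
--     'k': "O...O.",
--     'l': "O.O.O.",
--     'm': "OO..O.",
--     'n': "OO.OO.",
--     'o': "O..OO.",
--     'p': "OOO.O.",
--     'q': "OOOOO.",
--     'r': "O.OOO.",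
--     's': ".OO.O.",
--     't': ".OOOO.",
--     'u': "O...OO",
--     'v': "O.O.OO",
--     'w': ".OOO.O",
--     'x': "OO..OO",
--     'y': "OO.OOO",
--     'z': "O..OOO",
--
--     # idk if its okay to store here
--     ' ': "......",
--     '1': "O.....",
--     '2': "O.O...",
--     '3': "OO....",
--     '4': "OO.O..",
--     '5': "O..O..",
--     '6': "OOO...",
--     '7': "OOOO..",
--     '8': "O.OO..",
--     '9': ".OO...",
--     '0': ".OOO..",
-- }
--
-- capital_follows = ".....O"
--
-- number_follows = ".O.OOO"
--
-- def convert_english_to_braille(input_string):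
--     output = []
--     is_digit_start = True
--     for c in input_string:
--         # check if number
--         if c.isdigit() and is_digit_start:
--             is_digit_start = False
--             output.append(number_follows)
--         # check if capital
--         elif c.isupper():
--             output.append(capital_follows)
--             c = c.lower()
--         # if space, following digits no longer number
--         elif c == ' ':
--             is_digit_start = True
--         output.append(english_to_braille[c])
--     return ''.join(output)
-- ===== SOURCE B (Python) =====
-- english_to_braille = {
--     'a': "O.....", 'b': "O.O...", 'c': "OO....", 'd': "OO.O..", 'e': "O..O..",
--     'f': "OOO...", 'g': "OOOO..", 'h': "O.OO..", 'i': ".OO...", 'j': ".OOO..",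
--     'k': "O...O.", 'l': "O.O.O.", 'm': "OO..O.", 'n': "OO.OO.", 'o': "O..OO.",
--     'p': "OOO.O.", 'q': "OOOOO.", 'r': "O.OOO.", 's': ".OO.O.", 't': ".OOOO.",
--     'u': "O...OO", 'v': "O.O.OO", 'w': ".OOO.O", 'x': "OO..OO", 'y': "OO.OOO",
--     'z': "O..OOO",
--     ' ': "......",
--     '1': "O.....", '2': "O.O...", '3': "OO....", '4': "OO.O..", '5': "O..O..",
--     '6': "OOO...", '7': "OOOO..", '8': "O.OO..", '9': ".OO...", '0': ".OOO..",
-- }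
--
-- capital_follows = ".....O"
--
-- number_follows = ".O.OOO"
--
--
-- def translate_word(word):
--     # translate one space-free segment; number mode starts off and, once on,
--     # stays on until the end of the segment
--     cells = []
--     number_mode = False
--     for c in word:
--         if c.isdigit():
--             if not number_mode:
--                 cells.append(number_follows)
--                 number_mode = True
--         elif c.isupper():
--             cells.append(capital_follows)
--             c = c.lower()
--         cells.append(english_to_braille[c])
--     return ''.join(cells)
--
--
-- def convert_english_to_braille(input_string):
--     return english_to_braille[' '].join(
--         translate_word(word) for word in input_string.split(' '))
-- ===== Notes on version B (the rewrite author's own statement) =====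
-- stated objective: alternative
-- what changed: B replaces A's single character loop with a cross-character digit-mode flag reset on spaces by a word-level decomposition: split the input on the space character, translate each space-free segment with a local number-mode flag, and join the translated segments with the space cell.
import Mathlib
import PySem

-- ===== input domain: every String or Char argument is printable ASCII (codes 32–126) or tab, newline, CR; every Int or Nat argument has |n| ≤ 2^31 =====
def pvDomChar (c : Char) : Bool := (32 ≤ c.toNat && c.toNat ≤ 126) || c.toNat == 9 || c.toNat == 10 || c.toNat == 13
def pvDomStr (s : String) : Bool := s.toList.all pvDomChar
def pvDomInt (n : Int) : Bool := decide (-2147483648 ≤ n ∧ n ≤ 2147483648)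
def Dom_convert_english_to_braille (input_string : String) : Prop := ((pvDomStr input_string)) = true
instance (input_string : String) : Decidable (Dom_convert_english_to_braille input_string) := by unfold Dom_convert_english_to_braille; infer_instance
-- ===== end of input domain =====

-- B replaces A's single character loop (cross-character digit-mode flag, reset on spaces) by a
-- word-level decomposition: split on ' ', translate each space-free segment with a local
-- number-mode flag, join with the space cell.  Objective: alternative (same O(n) cost).

-- shared module constants (Python module-level dict and cells)
def english_to_braille : PySem.Dict Char String := PySem.Dict.ofList [
  ('a', "O....."), ('b', "O.O..."), ('c', "OO...."), ('d', "OO.O.."), ('e', "O..O.."),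
  ('f', "OOO..."), ('g', "OOOO.."), ('h', "O.OO.."), ('i', ".OO..."), ('j', ".OOO.."),
  ('k', "O...O."), ('l', "O.O.O."), ('m', "OO..O."), ('n', "OO.OO."), ('o', "O..OO."),
  ('p', "OOO.O."), ('q', "OOOOO."), ('r', "O.OOO."), ('s', ".OO.O."), ('t', ".OOOO."),
  ('u', "O...OO"), ('v', "O.O.OO"), ('w', ".OOO.O"), ('x', "OO..OO"), ('y', "OO.OOO"),
  ('z', "O..OOO"),
  (' ', "......"),
  ('1', "O....."), ('2', "O.O..."), ('3', "OO...."), ('4', "OO.O.."), ('5', "O..O.."),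
  ('6', "OOO..."), ('7', "OOOO.."), ('8', "O.OO.."), ('9', ".OO..."), ('0', ".OOO..")]

def capital_follows : String := ".....O"

def number_follows : String := ".O.OOO"

-- ===== PORT A =====
-- english_to_braille[c] is ported as (english_to_braille.get? c).getD "": Pre_ guarantees the
-- key is present (on a missing key Python raises KeyError — those inputs are outside Pre_)
-- one iteration of A's loop body (state: output list, is_digit_start flag)
def stepA (st : List String × Bool) (c : Char) : List String × Bool :=
  let (output, is_digit_start) := st
  let (output, c, is_digit_start) :=
    if PySem.Chars.isdigit c && is_digit_start then
      (output ++ [number_follows], c, false)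
    else if PySem.Chars.isupper c then
      (output ++ [capital_follows], PySem.Chars.lowerChar c, is_digit_start)
    else if c = ' ' then
      (output, c, true)
    else
      (output, c, is_digit_start)
  (output ++ [(english_to_braille.get? c).getD ""], is_digit_start)

def convert_english_to_braille (input_string : String) : String :=
  let st := input_string.toList.foldl stepA ([], true)
  PySem.Str.join "" st.1

-- ===== PORT B =====
-- one iteration of B's per-word loop body (state: cells list, number_mode flag)
def stepB (st : List String × Bool) (c : Char) : List String × Bool :=
  let (cells, number_mode) := st
  if PySem.Chars.isdigit c then
    if !number_mode then
      (cells ++ [number_follows, (english_to_braille.get? c).getD ""], true)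
    else
      (cells ++ [(english_to_braille.get? c).getD ""], number_mode)
  else if PySem.Chars.isupper c then
    (cells ++ [capital_follows, (english_to_braille.get? (PySem.Chars.lowerChar c)).getD ""], number_mode)
  else
    (cells ++ [(english_to_braille.get? c).getD ""], number_mode)

def translate_word (word : List Char) : String :=
  let st := word.foldl stepB ([], false)
  PySem.Str.join "" st.1

def convert_english_to_braille_alt (input_string : String) : String :=
  PySem.Str.join ((english_to_braille.get? ' ').getD "")
    ((PySem.Chars.splitOn input_string.toList [' ']).map translate_word)

-- ===== PRECONDITION & SPEC =====
-- Pre_ admits exactly the characters that are keys of the dictionary (letters, digits, space,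
-- with uppercase letters looked up lowercased); on any other character Python's A raises KeyError.
def Pre_convert_english_to_braille (input_string : String) : Prop :=
  input_string.toList.all (fun c => c == ' ' || c.isAlpha || c.isDigit) = true
instance (input_string : String) : Decidable (Pre_convert_english_to_braille input_string) := by
  unfold Pre_convert_english_to_braille; infer_instance

def pvWitness_convert_english_to_braille : String := "Abc 12 x9Y"

def Spec_convert_english_to_braille (input_string : String) (out : String) : Prop := out = convert_english_to_braille_alt input_string
instance (input_string : String) (out : String) : Decidable (Spec_convert_english_to_braille input_string out) := by unfold Spec_convert_english_to_braille; infer_instance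

-- ===== CLAIM (what is proved, stated in full; the proofs are below) =====
def Claim_equal_convert_english_to_braille : Prop := ∀ (input_string : String), Dom_convert_english_to_braille input_string → Pre_convert_english_to_braille input_string → Spec_convert_english_to_braille input_string (convert_english_to_braille input_string)

-- ===== LEMMAS AND PROOFS =====

theorem join_empty (xss : List (List Char)) : PySem.Chars.join [] xss = xss.flatten := by
  induction xss with
  | nil => rfl
  | cons x xs ih =>
    cases xs with
    | nil => simp [PySem.Chars.join, List.intercalate]
    | cons y ys => rw [PySem.Chars.join_cons_cons, ih]; simp

theorem join_cons_append (sp p q : List Char) (rest : List (List Char)) :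
    PySem.Chars.join sp ((p ++ q) :: rest) = p ++ PySem.Chars.join sp (q :: rest) := by
  cases rest with
  | nil => simp [PySem.Chars.join, List.intercalate]
  | cons r rs => rw [PySem.Chars.join_cons_cons, PySem.Chars.join_cons_cons]; simp

-- char-level model of A's loop output
def outA (b : Bool) : List Char → List Char
  | [] => []
  | c :: cs =>
    if PySem.Chars.isdigit c && b then
      number_follows.toList ++ ((english_to_braille.get? c).getD "").toList ++ outA false cs
    else if PySem.Chars.isupper c then
      capital_follows.toList ++ ((english_to_braille.get? (PySem.Chars.lowerChar c)).getD "").toList ++ outA b cs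
    else if c = ' ' then
      ((english_to_braille.get? ' ').getD "").toList ++ outA true cs
    else
      ((english_to_braille.get? c).getD "").toList ++ outA b cs

-- char-level model of B's per-word loop (m = number_mode)
def outB (m : Bool) : List Char → List Char
  | [] => []
  | c :: cs =>
    if PySem.Chars.isdigit c then
      if !m then number_follows.toList ++ ((english_to_braille.get? c).getD "").toList ++ outB true cs
      else ((english_to_braille.get? c).getD "").toList ++ outB true cs
    else if PySem.Chars.isupper c then
      capital_follows.toList ++ ((english_to_braille.get? (PySem.Chars.lowerChar c)).getD "").toList ++ outB m cs
    else
      ((english_to_braille.get? c).getD "").toList ++ outB m cs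

-- structural model of str.split(' ')
def msplit : List Char → List (List Char)
  | [] => [[]]
  | c :: cs =>
    if c = ' ' then [] :: msplit cs
    else
      match msplit cs with
      | [] => [[c]]
      | w :: ws => (c :: w) :: ws

theorem msplit_ne_nil (cs : List Char) : msplit cs ≠ [] := by
  cases cs with
  | nil => simp [msplit]
  | cons c cs =>
    simp only [msplit]
    split
    · simp
    · split <;> simp_all

theorem go_spec (fuel : Nat) (l cur : List Char) (acc : List (List Char))
    (h : l.length < fuel) :
    PySem.Chars.splitOn.go [' '] fuel l cur acc =
      acc.reverse ++ (match msplit l with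
                      | [] => [cur.reverse]
                      | w :: ws => (cur.reverse ++ w) :: ws) := by
  induction fuel generalizing l cur acc with
  | zero => omega
  | succ fuel ih =>
    cases l with
    | nil => simp [PySem.Chars.splitOn.go, msplit]
    | cons c rest =>
      by_cases hc : c = ' '
      · subst hc
        have : ([' '].isPrefixOf (' ' :: rest)) = true := by simp [List.isPrefixOf]
        rw [PySem.Chars.splitOn.go, if_pos this]
        simp only [List.length_singleton, List.drop_succ_cons, List.drop_zero]
        rw [ih rest [] (cur.reverse :: acc) (by simpa using Nat.lt_of_succ_lt_succ h)]
        simp only [msplit, List.reverse_cons, List.reverse_nil, List.nil_append]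
        cases hm : msplit rest with
        | nil => exact absurd hm (msplit_ne_nil rest)
        | cons w ws => simp
      · have : ([' '].isPrefixOf (c :: rest)) = false := by
          simp [List.isPrefixOf]; exact fun h' => hc h'.symm
        rw [PySem.Chars.splitOn.go, if_neg (by simp [this])]
        rw [ih rest (c :: cur) acc (by simpa using Nat.lt_of_succ_lt_succ h)]
        simp only [msplit, if_neg hc, List.reverse_cons]
        cases hm : msplit rest with
        | nil => exact absurd hm (msplit_ne_nil rest)
        | cons w ws => simp

theorem splitOn_eq_msplit (cs : List Char) :
    PySem.Chars.splitOn cs [' '] = msplit cs := by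
  have := go_spec (cs.length + 1) cs [] [] (by omega)
  rw [PySem.Chars.splitOn] at *
  rw [this]
  cases hm : msplit cs with
  | nil => exact absurd hm (msplit_ne_nil cs)
  | cons w ws => simp

-- A's fold computes outA (pieces concatenated)
theorem foldA_spec (cs : List Char) (acc : List String) (b : Bool) :
    PySem.Chars.join [] (((cs.foldl stepA (acc, b)).1).map String.toList) =
      PySem.Chars.join [] (acc.map String.toList) ++ outA b cs := by
  induction cs generalizing acc b with
  | nil => simp [outA]
  | cons c cs ih =>
    simp only [List.foldl_cons, stepA]
    by_cases h1 : PySem.Chars.isdigit c && b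
    · simp only [h1, ite_true]
      rw [ih]
      simp [outA, h1, join_empty]
    · by_cases h2 : PySem.Chars.isupper c
      · simp only [h1, h2, ite_true, ite_false, Bool.false_eq_true]
        rw [ih]
        simp [outA, h1, h2, join_empty]
      · by_cases h3 : c = ' '
        · subst h3
          simp only [show PySem.Chars.isdigit ' ' = false from rfl,
            show PySem.Chars.isupper ' ' = false from rfl, Bool.false_and,
            Bool.false_eq_true, ite_false, ite_true]
          rw [ih]
          simp [outA, join_empty, show PySem.Chars.isdigit ' ' = false from rfl,
            show PySem.Chars.isupper ' ' = false from rfl]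
        · simp only [h1, h2, h3, ite_false, Bool.false_eq_true]
          rw [ih]
          simp [outA, h1, h2, h3, join_empty]

-- B's per-word fold computes outB
theorem foldB_spec (cs : List Char) (acc : List String) (m : Bool) :
    PySem.Chars.join [] (((cs.foldl stepB (acc, m)).1).map String.toList) =
      PySem.Chars.join [] (acc.map String.toList) ++ outB m cs := by
  induction cs generalizing acc m with
  | nil => simp [outB]
  | cons c cs ih =>
    simp only [List.foldl_cons, stepB]
    by_cases h1 : PySem.Chars.isdigit c
    · cases m with
      | false =>
        simp only [h1, ite_true, Bool.not_false]
        rw [ih]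
        simp [outB, h1, join_empty]
      | true =>
        simp only [h1, ite_true, Bool.not_true, Bool.false_eq_true, ite_false]
        rw [ih]
        simp [outB, h1, join_empty]
    · by_cases h2 : PySem.Chars.isupper c
      · simp only [h1, h2, ite_true, ite_false, Bool.false_eq_true]
        rw [ih]
        simp [outB, h1, h2, join_empty]
      · simp only [h1, h2, ite_false, Bool.false_eq_true]
        rw [ih]
        simp [outB, h1, h2, join_empty]

theorem ne_space_of_isdigit (c : Char) (h : PySem.Chars.isdigit c = true) : c ≠ ' ' := by
  intro he; subst he; simp [PySem.Chars.isdigit] at h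

theorem isupper_of_isdigit (c : Char) (h : PySem.Chars.isdigit c = true) :
    PySem.Chars.isupper c = false := by
  simp only [PySem.Chars.isdigit, Bool.and_eq_true, decide_eq_true_eq] at h
  simp only [PySem.Chars.isupper, Bool.and_eq_false_iff, decide_eq_false_iff_not]
  obtain ⟨h1, h2⟩ := h
  rw [Char.le_def, UInt32.le_iff_toNat_le] at h2
  left
  intro hA
  rw [Char.le_def, UInt32.le_iff_toNat_le] at hA
  simp at h2 hA
  omega

-- the heart: A's loop = split / translate word-by-word / join with the space cell
theorem outA_eq_join (cs : List Char) (b : Bool) :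
    outA b cs =
      PySem.Chars.join ((english_to_braille.get? ' ').getD "").toList
        (outB (!b) (msplit cs).headI :: ((msplit cs).tail).map (outB false)) := by
  induction cs generalizing b with
  | nil => simp [outA, msplit, outB, PySem.Chars.join, List.intercalate]
  | cons c cs ih =>
    rcases hm : msplit cs with _ | ⟨w, ws⟩
    · exact absurd hm (msplit_ne_nil cs)
    by_cases hsp : c = ' '
    · subst hsp
      have hs : msplit (' ' :: cs) = [] :: w :: ws := by simp [msplit, hm]
      rw [show outA b (' ' :: cs) = ((english_to_braille.get? ' ').getD "").toList ++ outA true cs from by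
        simp [outA, show PySem.Chars.isdigit ' ' = false from rfl,
          show PySem.Chars.isupper ' ' = false from rfl]]
      rw [ih true, hm, hs]
      simp only [List.headI, List.tail, List.map_cons]
      rw [PySem.Chars.join_cons_cons]
      simp [outB]
    · have hs : msplit (c :: cs) = (c :: w) :: ws := by simp [msplit, hsp, hm]
      rw [hs]
      simp only [List.headI, List.tail]
      by_cases h1 : PySem.Chars.isdigit c
      · cases b with
        | true =>
          rw [show outA true (c :: cs)
              = number_follows.toList ++ ((english_to_braille.get? c).getD "").toList ++ outA false cs from by
            simp [outA, h1]]
          rw [show outB (!true) (c :: w)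
              = number_follows.toList ++ ((english_to_braille.get? c).getD "").toList ++ outB true w from by
            simp [outB, h1]]
          rw [ih false, hm]
          simp [join_cons_append, List.append_assoc]
        | false =>
          rw [show outA false (c :: cs) = ((english_to_braille.get? c).getD "").toList ++ outA false cs from by
            simp [outA, h1, isupper_of_isdigit c h1, ne_space_of_isdigit c h1]]
          rw [show outB (!false) (c :: w) = ((english_to_braille.get? c).getD "").toList ++ outB true w from by
            simp [outB, h1]]
          rw [ih false, hm]
          simp [join_cons_append]
      · by_cases h2 : PySem.Chars.isupper c
        · rw [show outA b (c :: cs)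
              = capital_follows.toList ++ ((english_to_braille.get? (PySem.Chars.lowerChar c)).getD "").toList
                ++ outA b cs from by
            simp [outA, h1, h2]]
          rw [show outB (!b) (c :: w)
              = capital_follows.toList ++ ((english_to_braille.get? (PySem.Chars.lowerChar c)).getD "").toList
                ++ outB (!b) w from by
            simp [outB, h1, h2]]
          rw [ih b, hm]
          simp [join_cons_append, List.append_assoc]
        · rw [show outA b (c :: cs) = ((english_to_braille.get? c).getD "").toList ++ outA b cs from by
            simp [outA, h1, h2, hsp]]
          rw [show outB (!b) (c :: w) = ((english_to_braille.get? c).getD "").toList ++ outB (!b) w from by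
            simp [outB, h1, h2]]
          rw [ih b, hm]
          simp [join_cons_append]

theorem translate_word_toList (w : List Char) :
    (translate_word w).toList = outB false w := by
  unfold translate_word
  rw [PySem.Str.toList_join]
  simp only [show ("" : String).toList = [] from rfl]
  rw [foldB_spec w [] false]
  simp

theorem main_toList (s : String) :
    (convert_english_to_braille s).toList = (convert_english_to_braille_alt s).toList := by
  unfold convert_english_to_braille convert_english_to_braille_alt
  rw [PySem.Str.toList_join, PySem.Str.toList_join]
  simp only [show ("" : String).toList = [] from rfl]
  rw [foldA_spec s.toList [] true, splitOn_eq_msplit, List.map_map]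
  simp only [List.map_nil, PySem.Chars.join_nil, List.nil_append]
  have hmap : (msplit s.toList).map (String.toList ∘ translate_word)
      = (msplit s.toList).map (outB false) := by
    apply List.map_congr_left
    intro w _
    exact translate_word_toList w
  rw [hmap, outA_eq_join s.toList true]
  rcases hm : msplit s.toList with _ | ⟨w, ws⟩
  · exact absurd hm (msplit_ne_nil s.toList)
  · simp

-- ===== VERDICT (by name: the statement is the Claim_ definition above) =====
theorem convert_english_to_braille_spec : Claim_equal_convert_english_to_braille := by
  intro s _ _
  unfold Spec_convert_english_to_braille
  exact String.ext (main_toList s)
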